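-- pv_equiv track=rewrite | github.com/poparab/jarz_pos | jarz_pos/api/notifications.py | _select_mobile_device_row
-- ===== SOURCE A (Python) =====
-- from typing import Any, Dict, Iterable, List, Optional, Sequence, Tuple, Union
--
-- def _is_enabled_mobile_device(row: Dict[str, Any]) -> bool:
--     try:
--         return int(row.get("enabled") or 0) == 1
--     except (TypeError, ValueError):
--         return False
--
-- def _select_mobile_device_row(rows: Sequence[Dict[str, Any]], user: str) -> Optional[Dict[str, Any]]:
--     if not rows:
--         return None
--
--     for candidates in (
--         [row for row in rows if row.get("user") == user and _is_enabled_mobile_device(row)],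
--         [row for row in rows if _is_enabled_mobile_device(row)],
--         [row for row in rows if row.get("user") == user],
--         list(rows),
--     ):
--         if candidates:
--             return candidates[0]
--
--     return None
-- ===== SOURCE B (Python) =====
-- def _is_enabled_mobile_device(row):
--     try:
--         return int(row.get("enabled") or 0) == 1
--     except (TypeError, ValueError):
--         return False
--
--
-- def _select_mobile_device_row(rows, user):
--     # Single pass with three "first match" slots and an early exit on the
--     # best class (user match AND enabled).
--     enabled_only = None
--     user_only = None
--     any_row = None
--     for row in rows:
--         en = _is_enabled_mobile_device(row)
--         um = row.get("user") == user
--         if en and um: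
--             return row
--         if en and enabled_only is None:
--             enabled_only = row
--         if um and user_only is None:
--             user_only = row
--         if any_row is None:
--             any_row = row
--     if enabled_only is not None:
--         return enabled_only
--     if user_only is not None:
--         return user_only
--     return any_row
-- ===== Notes on version B (the rewrite author's own statement) =====
-- stated objective: alternative
-- what changed: Replaces A's four separate filtering passes (each materializing a candidate list) with one single pass that keeps a first-match slot per priority class and returns immediately when a user+enabled row is seen; measured runtime is about the same.
import Mathlib
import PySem

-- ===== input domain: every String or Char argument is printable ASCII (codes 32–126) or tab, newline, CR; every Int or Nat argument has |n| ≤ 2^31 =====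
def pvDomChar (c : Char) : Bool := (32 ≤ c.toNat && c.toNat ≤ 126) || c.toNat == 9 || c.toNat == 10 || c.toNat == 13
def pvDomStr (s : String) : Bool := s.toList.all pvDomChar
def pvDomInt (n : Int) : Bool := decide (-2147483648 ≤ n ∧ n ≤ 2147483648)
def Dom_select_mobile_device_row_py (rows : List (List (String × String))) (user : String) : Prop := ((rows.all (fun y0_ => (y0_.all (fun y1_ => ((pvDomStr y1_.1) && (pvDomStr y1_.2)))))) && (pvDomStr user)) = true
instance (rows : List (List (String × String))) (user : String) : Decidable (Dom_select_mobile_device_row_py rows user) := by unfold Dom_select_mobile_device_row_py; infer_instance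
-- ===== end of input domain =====

-- B replaces A's four filtering passes by one single pass with first-match
-- slots per priority class and an early exit on a user+enabled row.

-- ===== PORT A =====
-- shared helper: _is_enabled_mobile_device(row).  row.get("enabled") or 0:
-- a missing key or empty string is falsy, giving int(0) == 1 = false; otherwise
-- int(s) == 1, with ValueError (ofStr? = none) caught as False.  TypeError
-- cannot occur for string values.
def pvIsEnabled (row : List (String × String)) : Bool :=
  match (PySem.Dict.mk row).get? "enabled" with
  | none => false
  | some s =>
    if s = "" then false
    else match PySem.Int.ofStr? s with
      | some n => n == 1
      | none => false

def select_mobile_device_row_py (rows : List (List (String × String))) (user : String) : Option (List (String × String)) :=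
  if rows.isEmpty then none
  else
    let c1 := rows.filter (fun row => ((PySem.Dict.mk row).get? "user" == some user) && pvIsEnabled row)
    let c2 := rows.filter (fun row => pvIsEnabled row)
    let c3 := rows.filter (fun row => (PySem.Dict.mk row).get? "user" == some user)
    -- the for-loop over the literal 4-tuple of candidate lists, unrolled
    match c1 with
    | r :: _ => some r
    | [] =>
      match c2 with
      | r :: _ => some r
      | [] =>
        match c3 with
        | r :: _ => some r
        | [] =>
          match rows with
          | r :: _ => some r
          | [] => none

-- ===== PORT B =====
-- the single loop of Source B: slots (enabled_only, user_only, any_row)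
def pvGoB (user : String) : List (List (String × String)) → Option (List (String × String)) → Option (List (String × String)) → Option (List (String × String)) → Option (List (String × String))
  | [], e, u, a =>
    match e with
    | some r => some r
    | none =>
      match u with
      | some r => some r
      | none => a
  | row :: rest, e, u, a =>
    let en := pvIsEnabled row
    let um := (PySem.Dict.mk row).get? "user" == some user
    if en && um then some row
    else
      pvGoB user rest (if en && e.isNone then some row else e)
        (if um && u.isNone then some row else u)
        (if a.isNone then some row else a)

def select_mobile_device_row_py_alt (rows : List (List (String × String))) (user : String) : Option (List (String × String)) :=
  pvGoB user rows none none none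

-- ===== PRECONDITION & SPEC =====
def Spec_select_mobile_device_row_py (rows : List (List (String × String))) (user : String) (out : Option (List (String × String))) : Prop := out = select_mobile_device_row_py_alt rows user
instance (rows : List (List (String × String))) (user : String) (out : Option (List (String × String))) : Decidable (Spec_select_mobile_device_row_py rows user out) := by unfold Spec_select_mobile_device_row_py; infer_instance

-- ===== CLAIM (what is proved, stated in full; the proofs are below) =====
def Claim_equal_select_mobile_device_row_py : Prop := ∀ (rows : List (List (String × String))) (user : String), Dom_select_mobile_device_row_py rows user → Spec_select_mobile_device_row_py rows user (select_mobile_device_row_py rows user)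

-- ===== LEMMAS AND PROOFS =====

-- ===== VERDICT (by name: the statement is the Claim_ definition above) =====
-- invariant of B's loop: with pending slots e u a, the loop computes the
-- priority chain of first matches over the remaining rows, each slot shadowing
-- the corresponding later first match.
theorem pvGoB_eq (user : String) (rows : List (List (String × String)))
    (e u a : Option (List (String × String))) :
    pvGoB user rows e u a =
      ((rows.filter (fun row => ((PySem.Dict.mk row).get? "user" == some user) && pvIsEnabled row)).head?).or
        (((e.or (rows.filter (fun row => pvIsEnabled row)).head?)).or
          (((u.or (rows.filter (fun row => (PySem.Dict.mk row).get? "user" == some user)).head?)).or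
            (a.or rows.head?))) := by
  induction rows generalizing e u a with
  | nil =>
    cases e <;> cases u <;> cases a <;> simp [pvGoB]
  | cons row rest ih =>
    by_cases hen : pvIsEnabled row = true <;>
      by_cases hum : ((PySem.Dict.mk row).get? "user" == some user) = true <;>
        cases e <;> cases u <;> cases a <;>
          simp [pvGoB, hen, hum, ih]

theorem select_mobile_device_row_py_spec : Claim_equal_select_mobile_device_row_py := by
  intro rows user _
  unfold Spec_select_mobile_device_row_py select_mobile_device_row_py select_mobile_device_row_py_alt
  rw [pvGoB_eq]
  cases rows with
  | nil => simp
  | cons r rest =>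
    simp only [List.isEmpty_cons, if_neg Bool.false_ne_true, Option.none_or]
    rcases h1 : (r :: rest).filter (fun row => ((PySem.Dict.mk row).get? "user" == some user) && pvIsEnabled row) with _ | ⟨x1, t1⟩ <;>
    rcases h2 : (r :: rest).filter (fun row => pvIsEnabled row) with _ | ⟨x2, t2⟩ <;>
    rcases h3 : (r :: rest).filter (fun row => (PySem.Dict.mk row).get? "user" == some user) with _ | ⟨x3, t3⟩ <;>
      simp [Option.or]
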